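-- pv_equiv track=rewrite | github.com/ipl-uw/2019-CVPR-AIC-Track-1-UWIPL | Transition-Model/camera_transition.py | valid_order
-- ===== SOURCE A (Python) =====
-- def valid_order(src, dst):
-- 	pos = -1
-- 	for x in src:
-- 		if x in dst:
-- 			p = dst.index(x)
-- 			if p < pos:
-- 				return False
-- 			else: # non-decreasing is ok
-- 				pos = p
-- 	return True
-- ===== SOURCE B (Python) =====
-- def valid_order(src, dst):
--     positions = [dst.index(x) for x in src if x in dst]
--     return positions == sorted(positions)
-- ===== Notes on version B (the rewrite author's own statement) =====
-- stated objective: alternative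
-- what changed: A's fused online scan tracking a running last-position is replaced by two phases: build the projected index list, then decide non-decreasingness by comparing it with its sorted form.
import Mathlib
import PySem

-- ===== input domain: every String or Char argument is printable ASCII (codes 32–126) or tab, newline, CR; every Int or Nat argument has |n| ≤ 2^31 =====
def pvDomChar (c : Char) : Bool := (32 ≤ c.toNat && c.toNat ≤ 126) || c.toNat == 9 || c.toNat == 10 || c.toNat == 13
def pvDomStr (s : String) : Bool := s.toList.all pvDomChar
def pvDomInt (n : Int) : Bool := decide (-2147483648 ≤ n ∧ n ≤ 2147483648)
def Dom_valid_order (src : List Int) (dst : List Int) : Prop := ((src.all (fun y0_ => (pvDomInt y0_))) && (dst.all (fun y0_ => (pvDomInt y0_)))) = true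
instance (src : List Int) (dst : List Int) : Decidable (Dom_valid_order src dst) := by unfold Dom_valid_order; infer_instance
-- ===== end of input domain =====

-- B replaces A's fused online scan (running last position) by a two-phase check:
-- build the projected dst-index list, then compare it with its own sorted form.

-- ===== PORT A =====
-- A's for-loop over src with the running accumulator `pos` (early return False on p < pos)
def validOrderLoop (dst : List Int) : List Int → Int → Bool
  | [], _ => true
  | x :: rest, pos =>
    if dst.contains x then
      let p : Int := ((PySem.List.index? dst x).getD 0 : Nat)   -- dst.index(x); in-range by the guard
      if p < pos then false
      else validOrderLoop dst rest p
    else validOrderLoop dst rest pos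

def valid_order (src : List Int) (dst : List Int) : Bool :=
  validOrderLoop dst src (-1)

-- ===== PORT B =====
-- positions = [dst.index(x) for x in src if x in dst]; return positions == sorted(positions)
def valid_order_alt (src : List Int) (dst : List Int) : Bool :=
  let positions : List Int :=
    src.filterMap (fun x =>
      if dst.contains x then (PySem.List.index? dst x).map (fun n => (n : Int)) else none)
  positions == PySem.List.sorted positions (fun x => x) false

-- ===== PRECONDITION & SPEC =====
def Spec_valid_order (src : List Int) (dst : List Int) (out : Bool) : Prop := out = valid_order_alt src dst
instance (src : List Int) (dst : List Int) (out : Bool) : Decidable (Spec_valid_order src dst out) := by unfold Spec_valid_order; infer_instance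

-- ===== CLAIM (what is proved, stated in full; the proofs are below) =====
def Claim_equal_valid_order : Prop := ∀ (src : List Int) (dst : List Int), Dom_valid_order src dst → Spec_valid_order src dst (valid_order src dst)

-- ===== LEMMAS AND PROOFS =====

-- the projected position list both programs are about
def pvPositions (src dst : List Int) : List Int :=
  src.filterMap (fun x =>
    if dst.contains x then (PySem.List.index? dst x).map (fun n => (n : Int)) else none)

lemma pvPositions_nonneg (src dst : List Int) : ∀ p ∈ pvPositions src dst, (0:Int) ≤ p := by
  intro p hp
  rw [pvPositions, List.mem_filterMap] at hp
  obtain ⟨x, -, hx⟩ := hp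
  by_cases h : dst.contains x
  · rw [if_pos h] at hx
    cases hidx : PySem.List.index? dst x with
    | none => rw [hidx] at hx; exact absurd hx (by simp)
    | some n =>
      rw [hidx] at hx; simp at hx
      omega
  · rw [if_neg h] at hx; exact absurd hx (by simp)

lemma pvPositions_cons_mem {x : Int} {dst : List Int} (rest : List Int) {n : Nat}
    (hx : dst.contains x = true) (hn : PySem.List.index? dst x = some n) :
    pvPositions (x :: rest) dst = (n : Int) :: pvPositions rest dst := by
  rw [pvPositions, List.filterMap_cons, if_pos hx, hn]
  rfl

lemma pvPositions_cons_notmem {x : Int} {dst : List Int} (rest : List Int)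
    (hx : ¬ dst.contains x = true) :
    pvPositions (x :: rest) dst = pvPositions rest dst := by
  rw [pvPositions, List.filterMap_cons, if_neg hx]
  rfl

lemma loop_iff_chain (dst : List Int) (src : List Int) (pos : Int) :
    validOrderLoop dst src pos = true ↔ List.IsChain (· ≤ ·) (pos :: pvPositions src dst) := by
  induction src generalizing pos with
  | nil => simp [validOrderLoop, pvPositions]
  | cons x rest ih =>
    by_cases hx : dst.contains x
    · obtain ⟨n, hn⟩ : ∃ n, PySem.List.index? dst x = some n :=
        Option.isSome_iff_exists.mp
          ((PySem.List.index?_isSome_iff dst x).mpr (by simpa using hx))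
      rw [pvPositions_cons_mem rest hx hn]
      rw [validOrderLoop, if_pos hx, hn, Option.getD_some]
      by_cases hlt : (n : Int) < pos
      · rw [if_pos hlt]
        simp only [List.isChain_cons_cons]
        constructor
        · intro h; exact absurd h (by simp)
        · rintro ⟨h1, -⟩; omega
      · rw [if_neg hlt, ih]
        simp only [List.isChain_cons_cons]
        constructor
        · intro h; exact ⟨by omega, h⟩
        · rintro ⟨-, h⟩; exact h
    · rw [pvPositions_cons_notmem rest hx]
      rw [validOrderLoop, if_neg hx]
      exact ih pos

lemma alt_iff_pairwise (src dst : List Int) :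
    valid_order_alt src dst = true ↔ (pvPositions src dst).Pairwise (· ≤ ·) := by
  show (pvPositions src dst == PySem.List.sorted (pvPositions src dst) (fun x => x) false) = true ↔ _
  rw [beq_iff_eq]
  constructor
  · intro heq
    have hp := PySem.List.sorted_pairwise (pvPositions src dst) (fun x => x)
    rw [← heq] at hp
    exact hp
  · intro hp
    exact (PySem.List.sorted_eq_self_of_pairwise _ _ hp).symm

-- ===== VERDICT (by name: the statement is the Claim_ definition above) =====
theorem valid_order_spec : Claim_equal_valid_order := by
  intro src dst _
  show valid_order src dst = valid_order_alt src dst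
  rw [Bool.eq_iff_iff, valid_order, loop_iff_chain, alt_iff_pairwise]
  have hnn := pvPositions_nonneg src dst
  cases hP : pvPositions src dst with
  | nil => simp
  | cons a l =>
    have ha : (0:Int) ≤ a := hnn a (by rw [hP]; exact List.mem_cons_self)
    rw [List.isChain_cons_cons, ← List.isChain_iff_pairwise]
    constructor
    · rintro ⟨-, hc⟩; exact hc
    · intro hc; exact ⟨by omega, hc⟩
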